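-- pv_equiv track=rewrite | github.com/minsung-phy/Programming-Basics | 11주차/연습 9.2.py | sparse_add
-- ===== SOURCE A (Python) =====
-- def sparse_add(ms, ns):
-- 	for key in ms:
-- 		value = ns.get(key)
-- 		if value != None:
-- 			ms[key] += value
-- 			del ns[key]
-- 	for key in ns:
-- 		ms[key] = ns[key]
-- 	return ms
-- ===== SOURCE B (Python) =====
-- # B: one uniform accumulation pass over ns with a get-default, instead of A's
-- # two staged passes (scan ms for overlaps + delete from ns, then copy leftovers).
-- # A also empties the matched keys out of ns in place; B leaves ns untouched, so
-- # only the return value (and the final state of ms) is equivalent.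
-- def sparse_add(ms, ns):
--     for key, value in ns.items():
--         ms[key] = ms.get(key, 0) + value
--     return ms
-- ===== Notes on version B (the rewrite author's own statement) =====
-- stated objective: simpler
-- what changed: B replaces A's two staged passes (scan ms for overlapping keys while deleting them from ns, then copy the leftover ns entries) by one uniform accumulation pass over ns using ms.get(key, 0) + value, with no membership branch, no scan of ms and no deletion; A's in-place emptying of ns is not reproduced, equivalence is about the returned dict.
import Mathlib
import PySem

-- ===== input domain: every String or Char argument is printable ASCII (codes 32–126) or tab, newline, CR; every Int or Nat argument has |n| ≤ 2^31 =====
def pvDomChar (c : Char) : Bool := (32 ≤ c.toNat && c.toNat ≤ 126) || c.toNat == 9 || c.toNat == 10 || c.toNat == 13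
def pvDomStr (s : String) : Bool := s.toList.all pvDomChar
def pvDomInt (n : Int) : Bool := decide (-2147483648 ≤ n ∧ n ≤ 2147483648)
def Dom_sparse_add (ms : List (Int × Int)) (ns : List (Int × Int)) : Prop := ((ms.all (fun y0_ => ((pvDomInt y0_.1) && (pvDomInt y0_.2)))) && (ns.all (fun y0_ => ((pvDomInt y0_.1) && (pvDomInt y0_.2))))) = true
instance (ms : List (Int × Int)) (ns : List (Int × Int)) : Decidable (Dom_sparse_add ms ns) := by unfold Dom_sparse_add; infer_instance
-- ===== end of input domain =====

-- B does one uniform accumulation pass over ns with ms.get(key, 0) + value, instead of A's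
-- two staged passes (scan ms for overlaps while deleting from ns, then copy the leftovers);
-- A mutates both arguments in place, B leaves ns untouched — the equivalence proved here is
-- about the RETURN value. Objective: simpler; no speed claim.

-- ===== PORT A =====
-- first loop body: `value = ns.get(key); if value != None: ms[key] += value; del ns[key]`
-- (values are ints, so `value != None` is exactly `key in ns`, i.e. get? = some v)
def pvStepA (p : PySem.Dict Int Int × PySem.Dict Int Int) (key : Int) :
    PySem.Dict Int Int × PySem.Dict Int Int :=
  match p.2.get? key with
  | some v => (p.1.modify key 0 (· + v), p.2.erase key)
  | none => p

def sparse_add (ms : List (Int × Int)) (ns : List (Int × Int)) : List (Int × Int) :=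
  let m := PySem.Dict.ofList ms
  let n := PySem.Dict.ofList ns
  let p := m.keys.foldl pvStepA (m, n)
  -- `for key in ns: ms[key] = ns[key]` (key ∈ ns, so ns[key] is p.2.getD key 0)
  let m2 := p.2.keys.foldl (fun acc key => acc.insert key (p.2.getD key 0)) p.1
  m2.items

-- ===== PORT B =====
-- `for key, value in ns.items(): ms[key] = ms.get(key, 0) + value; return ms`
def sparse_add_alt (ms : List (Int × Int)) (ns : List (Int × Int)) : List (Int × Int) :=
  ((PySem.Dict.ofList ns).items.foldl
      (fun m kv => m.insert kv.1 (m.getD kv.1 0 + kv.2))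
      (PySem.Dict.ofList ms)).items

-- ===== PRECONDITION & SPEC =====
def Spec_sparse_add (ms : List (Int × Int)) (ns : List (Int × Int)) (out : List (Int × Int)) : Prop :=
  out = sparse_add_alt ms ns
instance (ms : List (Int × Int)) (ns : List (Int × Int)) (out : List (Int × Int)) :
    Decidable (Spec_sparse_add ms ns out) := by unfold Spec_sparse_add; infer_instance

-- ===== CLAIM =====
def Claim_equal_sparse_add : Prop :=
  ∀ (ms : List (Int × Int)) (ns : List (Int × Int)),
    Dom_sparse_add ms ns → Spec_sparse_add ms ns (sparse_add ms ns)

-- ===== LEMMAS AND PROOFS =====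

-- first-match lookup in an association list, default 0 (the value pvLoopB accumulates)
def pvLk (l : List (Int × Int)) (k : Int) : Int :=
  ((l.find? (fun q => q.1 == k)).map Prod.snd).getD 0

theorem pv_find?_filter_ne (l : List (Int × Int)) (k j : Int) (h : j ≠ k) :
    List.find? (fun p => p.1 == j) (l.filter (fun p => !(p.1 == k)))
      = List.find? (fun p => p.1 == j) l := by
  induction l with
  | nil => rfl
  | cons q l ih =>
      by_cases hj : q.1 = j
      · have hk : (q.1 == k) = false := by simp [hj]; exact h
        simp [hj, h]
      · by_cases hk : q.1 = k <;> simp [hk, hj, ih, Ne.symm h]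

theorem pv_get?_erase_of_ne {n : PySem.Dict Int Int} {k j : Int} (h : j ≠ k) :
    (n.erase k).get? j = n.get? j := by
  unfold PySem.Dict.erase PySem.Dict.get?
  simp only
  rw [pv_find?_filter_ne n.items k j h]

-- A's first loop, characterised: ms gets every overlapping value added, ns keeps the rest
theorem pv_loop1 (ks : List Int) (m n : PySem.Dict Int Int)
    (hks : ks.Nodup) (hm : m.keys.Nodup) (hsub : ∀ k ∈ ks, m.contains k = true) :
    (ks.foldl pvStepA (m, n)).1.items
        = m.items.map (fun p => if p.1 ∈ ks then (p.1, p.2 + n.getD p.1 0) else p)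
    ∧ (ks.foldl pvStepA (m, n)).2.items
        = n.items.filter (fun p => !decide (p.1 ∈ ks)) := by
  induction ks generalizing m n with
  | nil => simp
  | cons k ks ih =>
      have hknotin : k ∉ ks := (List.nodup_cons.mp hks).1
      have hksnd : ks.Nodup := (List.nodup_cons.mp hks).2
      have hmk : m.contains k = true := hsub k (List.mem_cons_self)
      simp only [List.foldl_cons]
      cases hget : n.get? k with
      | none =>
          have hstep : pvStepA (m, n) k = (m, n) := by simp [pvStepA, hget]
          rw [hstep]
          obtain ⟨h1, h2⟩ := ih m n hksnd hm (fun k' hk' => hsub k' (List.mem_cons_of_mem _ hk'))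
          constructor
          · rw [h1]
            apply List.map_congr_left
            intro p _
            by_cases hpk : p.1 = k
            · subst hpk
              have hgd : n.getD p.1 0 = 0 := by
                simp [PySem.Dict.getD, hget]
              simp [hknotin, hgd]
            · simp [List.mem_cons, hpk]
          · rw [h2]
            apply List.filter_congr
            intro p hp
            have hnone : n.items.find? (fun q => q.1 == k) = none := by
              have := hget
              unfold PySem.Dict.get? at this
              exact Option.map_eq_none_iff.mp this
            have hpk : p.1 ≠ k := by
              simpa using List.find?_eq_none.mp hnone p hp
            simp [List.mem_cons, hpk]
      | some v =>
          have hstep : pvStepA (m, n) k = (m.modify k 0 (· + v), n.erase k) := by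
            simp [pvStepA, hget]
          rw [hstep]
          have hmodins : m.modify k 0 (· + v) = m.insert k (m.getD k 0 + v) := rfl
          have hm' : (m.modify k 0 (· + v)).keys.Nodup := by
            rw [hmodins, PySem.Dict.keys_insert_of_contains _ _ hmk]; exact hm
          have hsub' : ∀ k' ∈ ks, (m.modify k 0 (· + v)).contains k' = true := by
            intro k' hk'
            rw [hmodins, PySem.Dict.contains_insert]
            simp [hsub k' (List.mem_cons_of_mem _ hk')]
          obtain ⟨h1, h2⟩ := ih _ _ hksnd hm' hsub'
          have hitems : (m.modify k 0 (· + v)).items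
              = m.items.map (fun p => if (p.1 == k) then (k, m.getD k 0 + v) else p) := by
            rw [hmodins]; exact PySem.Dict.items_insert_of_contains m _ hmk
          constructor
          · rw [h1, hitems, List.map_map]
            apply List.map_congr_left
            intro p hp
            by_cases hpk : p.1 = k
            · subst hpk
              have hpd : m.getD p.1 0 = p.2 := by
                have hmem : (p.1, p.2) ∈ m.items := by simpa using hp
                exact PySem.Dict.getD_of_mem_items m hmem hm 0
              have hgd : n.getD p.1 0 = v := by simp [PySem.Dict.getD, hget]
              simp [Function.comp, hknotin, hpd, hgd]
            · have hne : ¬(p.1 == k) = true := by simp [hpk]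
              have hgd : (n.erase k).getD p.1 0 = n.getD p.1 0 := by
                simp [PySem.Dict.getD, pv_get?_erase_of_ne hpk]
              simp [Function.comp, hne, List.mem_cons, hpk, hgd]
          · rw [h2]
            unfold PySem.Dict.erase
            simp only [List.filter_filter]
            apply List.filter_congr
            intro p _
            by_cases hpk : p.1 = k <;> simp [List.mem_cons, hpk]

-- A's result in closed form
theorem pv_canonical (ms ns : List (Int × Int)) :
    sparse_add ms ns
      = (PySem.Dict.ofList ms).items.map
          (fun p => (p.1, p.2 + (PySem.Dict.ofList ns).getD p.1 0))
        ++ (PySem.Dict.ofList ns).items.filter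
          (fun p => !decide (p.1 ∈ (PySem.Dict.ofList ms).keys)) := by
  unfold sparse_add
  simp only
  set m := PySem.Dict.ofList ms with hmdef
  set n := PySem.Dict.ofList ns with hndef
  have hm : m.keys.Nodup := PySem.Dict.nodup_keys_ofList ms
  have hn : n.keys.Nodup := PySem.Dict.nodup_keys_ofList ns
  obtain ⟨h1, h2⟩ := pv_loop1 m.keys m n hm hm
    (fun k hk => (PySem.Dict.contains_iff_mem_keys _ _).mpr hk)
  set p := m.keys.foldl pvStepA (m, n) with hpdef
  have hp1keys : p.1.keys = m.keys := by
    unfold PySem.Dict.keys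
    rw [h1, List.map_map]
    apply List.map_congr_left
    intro q _
    by_cases hq : q.1 ∈ m.keys <;> simp [Function.comp, hq]
  have hp2sub : p.2.items.Sublist n.items := by rw [h2]; exact List.filter_sublist
  have hp2keys : p.2.keys.Nodup := List.Nodup.sublist (List.Sublist.map _ hp2sub) hn
  have hfresh : ∀ k ∈ p.2.keys, p.1.contains k = false := by
    intro k hk
    obtain ⟨q, hq, hqk⟩ := List.mem_map.mp hk
    rw [h2] at hq
    have := List.of_mem_filter hq
    rw [hqk] at this
    rw [PySem.Dict.contains_eq_decide_mem_keys, hp1keys]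
    simpa using this
  have hfold := PySem.Dict.items_foldl_insert_fresh p.2.keys (fun k => k)
      (fun k => p.2.getD k 0) p.1 hfresh (by simpa using hp2keys)
  have hfold' : (List.foldl (fun acc key => acc.insert key (p.2.getD key 0)) p.1 p.2.keys).items
      = p.1.items ++ p.2.keys.map (fun k => (k, p.2.getD k 0)) := by simpa using hfold
  rw [hfold', ← PySem.Dict.items_eq_map_keys p.2 hp2keys 0]
  rw [h1, h2]
  congr 1
  apply List.map_congr_left
  intro q hq
  have : q.1 ∈ m.keys := PySem.Dict.mem_keys_of_mem_items m hq
  simp [this]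

theorem pvLk_cons (k v : Int) (rest : List (Int × Int)) (j : Int) :
    pvLk ((k, v) :: rest) j = if j = k then v else pvLk rest j := by
  by_cases h : j = k
  · subst h; simp [pvLk]
  · simp [pvLk, Ne.symm h, h]

-- B's loop, characterised: existing keys accumulate their ns value, new keys append in order
theorem pv_loopB (l : List (Int × Int)) (m : PySem.Dict Int Int)
    (hl : (l.map Prod.fst).Nodup) (hm : m.keys.Nodup) :
    (l.foldl (fun m kv => m.insert kv.1 (m.getD kv.1 0 + kv.2)) m).items
      = m.items.map (fun p => (p.1, p.2 + pvLk l p.1))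
        ++ l.filter (fun q => !(m.contains q.1)) := by
  induction l generalizing m with
  | nil => simp [pvLk]
  | cons kv rest ih =>
      obtain ⟨k, v⟩ := kv
      simp only [List.map_cons, List.nodup_cons] at hl
      obtain ⟨hknotin, hrestnd⟩ := hl
      simp only [List.foldl_cons]
      have hLkrest : pvLk rest k = 0 := by
        have : rest.find? (fun q => q.1 == k) = none := by
          rw [List.find?_eq_none]
          intro q hq
          simp only [beq_iff_eq]
          intro h
          exact hknotin (h ▸ List.mem_map_of_mem hq)
        simp [pvLk, this]
      by_cases hc : m.contains k = true
      · have hm' : (m.insert k (m.getD k 0 + v)).keys.Nodup := by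
          rw [PySem.Dict.keys_insert_of_contains _ _ hc]; exact hm
        rw [ih _ hrestnd hm']
        rw [PySem.Dict.items_insert_of_contains m _ hc, List.map_map]
        congr 1
        · apply List.map_congr_left
          intro p hp
          by_cases hpk : p.1 = k
          · subst hpk
            have hpd : m.getD p.1 0 = p.2 := by
              have hmem : (p.1, p.2) ∈ m.items := by simpa using hp
              exact PySem.Dict.getD_of_mem_items m hmem hm 0
            simp [Function.comp, pvLk_cons, hpd, hLkrest]
          · have hne : ¬(p.1 == k) = true := by simp [hpk]
            simp [Function.comp, hne, pvLk_cons, hpk]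
        · have hhead : (!(m.contains k)) = false := by simp [hc]
          rw [List.filter_cons]
          rw [hhead]
          simp only [Bool.false_eq_true, if_false]
          apply List.filter_congr
          intro q hq
          have hqk : q.1 ≠ k := by
            intro h
            exact hknotin (h ▸ List.mem_map_of_mem hq)
          rw [PySem.Dict.contains_insert]
          simp [hqk]
      · have hcf : m.contains k = false := by simpa using hc
        have hk_not_mem : k ∉ m.keys := by
          rw [PySem.Dict.contains_eq_decide_mem_keys] at hcf
          simpa using hcf
        have hm' : (m.insert k (m.getD k 0 + v)).keys.Nodup := by
          rw [PySem.Dict.keys_insert_of_not_contains _ _ hcf]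
          simp [List.nodup_append, hm]
          intro a ha h
          exact hk_not_mem (h ▸ ha)
        rw [ih _ hrestnd hm']
        rw [PySem.Dict.items_insert_of_not_contains m _ hcf]
        rw [PySem.Dict.getD_of_not_contains m 0 hcf]
        rw [List.map_append]
        rw [List.filter_cons]
        have hhead : (!(m.contains k)) = true := by simp [hcf]
        rw [hhead]
        simp only [if_true]
        rw [List.append_assoc]
        congr 1
        · apply List.map_congr_left
          intro p hp
          have hpk : p.1 ≠ k := by
            intro h
            exact hk_not_mem (h ▸ PySem.Dict.mem_keys_of_mem_items m hp)
          simp [pvLk_cons, hpk]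
        · simp only [List.map_cons, List.map_nil, hLkrest, add_zero, zero_add,
            List.singleton_append]
          congr 1
          apply List.filter_congr
          intro q hq
          have hqk : q.1 ≠ k := by
            intro h
            exact hknotin (h ▸ List.mem_map_of_mem hq)
          rw [PySem.Dict.contains_insert]
          simp [hqk]

-- B's result in the same closed form
theorem pv_alt_canonical (ms ns : List (Int × Int)) :
    sparse_add_alt ms ns
      = (PySem.Dict.ofList ms).items.map
          (fun p => (p.1, p.2 + (PySem.Dict.ofList ns).getD p.1 0))
        ++ (PySem.Dict.ofList ns).items.filter
          (fun p => !decide (p.1 ∈ (PySem.Dict.ofList ms).keys)) := by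
  unfold sparse_add_alt
  set m := PySem.Dict.ofList ms with hmdef
  set n := PySem.Dict.ofList ns with hndef
  have hm : m.keys.Nodup := PySem.Dict.nodup_keys_ofList ms
  have hn : (n.items.map Prod.fst).Nodup := PySem.Dict.nodup_keys_ofList ns
  rw [pv_loopB n.items m hn hm]
  have hmap : List.map (fun p => (p.1, p.2 + pvLk n.items p.1)) m.items
      = List.map (fun p => (p.1, p.2 + n.getD p.1 0)) m.items := by
    apply List.map_congr_left
    intro p _
    have : pvLk n.items p.1 = n.getD p.1 0 := by
      simp [pvLk, PySem.Dict.getD, PySem.Dict.get?, Option.getD]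
    rw [this]
  have hfil : List.filter (fun q => !m.contains q.1) n.items
      = List.filter (fun p => !decide (p.1 ∈ m.keys)) n.items := by
    apply List.filter_congr
    intro q _
    rw [PySem.Dict.contains_eq_decide_mem_keys]
  rw [hmap, hfil]

-- ===== VERDICT =====
theorem sparse_add_spec : Claim_equal_sparse_add := by
  intro ms ns _
  unfold Spec_sparse_add
  rw [pv_canonical, pv_alt_canonical]
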